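-- pv_equiv track=rewrite | github.com/lbryio/lbry-sdk | scripts/release.py | get_release_text
-- ===== SOURCE A (Python) =====
-- RELEASE_TEXT = 'release-text:'
--
-- RELEASE_TEXT_LINES = 'release-text-lines:'
--
-- def get_release_text(desc: str):
--     in_release_lines = False
--     for line in desc.splitlines():
--         if in_release_lines:
--             yield line.rstrip()
--         elif line.startswith(RELEASE_TEXT_LINES):
--             in_release_lines = True
--         elif line.startswith(RELEASE_TEXT):
--             yield line[len(RELEASE_TEXT):].strip()
--             yield ''
-- ===== SOURCE B (Python) =====
-- RELEASE_TEXT = 'release-text:'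
--
-- RELEASE_TEXT_LINES = 'release-text-lines:'
--
-- def get_release_text(desc):
--     lines = desc.splitlines()
--     idx = next((i for i, l in enumerate(lines) if l.startswith(RELEASE_TEXT_LINES)), None)
--     for line in (lines if idx is None else lines[:idx]):
--         if line.startswith(RELEASE_TEXT):
--             yield line[len(RELEASE_TEXT):].strip()
--             yield ''
--     if idx is not None:
--         for line in lines[idx + 1:]:
--             yield line.rstrip()
-- ===== Notes on version B (the rewrite author's own statement) =====
-- stated objective: alternative
-- what changed: Replaces A's single flag-carrying streaming pass with an index-find of the first marker line followed by two differently-shaped passes: a release-text emission pass over the prefix and an rstrip map over the suffix.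
import Mathlib
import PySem

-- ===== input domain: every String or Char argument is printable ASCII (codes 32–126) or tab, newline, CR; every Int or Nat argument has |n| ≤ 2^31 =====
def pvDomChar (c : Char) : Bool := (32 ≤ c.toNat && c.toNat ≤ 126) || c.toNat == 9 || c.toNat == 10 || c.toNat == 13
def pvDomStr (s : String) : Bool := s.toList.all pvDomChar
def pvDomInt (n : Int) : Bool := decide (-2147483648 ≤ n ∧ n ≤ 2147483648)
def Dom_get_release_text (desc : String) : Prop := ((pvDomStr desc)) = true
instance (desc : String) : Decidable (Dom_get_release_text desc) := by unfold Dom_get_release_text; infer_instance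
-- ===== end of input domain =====

-- B replaces A's single flag-carrying streaming pass with an index-find of the first
-- marker line plus two separate slice passes (alternative decomposition, same cost).

-- ===== PORT A =====
-- A's generator loop over desc.splitlines(), step for step: the flag `in_release_lines`
-- is the Bool argument; each `yield` conses onto the result.
def pvALoop : List String → Bool → List String
  | [], _ => []
  | line :: rest, inR =>
    if inR then
      PySem.Str.rstrip line :: pvALoop rest inR
    else if PySem.Str.startswith line "release-text-lines:" then
      pvALoop rest true
    else if PySem.Str.startswith line "release-text:" then
      PySem.Str.strip (PySem.Str.slice line (some 13) none) :: "" :: pvALoop rest inR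
    else
      pvALoop rest inR

def get_release_text (desc : String) : List String :=
  pvALoop (PySem.Str.splitlines desc) false

-- ===== PORT B =====
-- B's per-line release-text emission (the body of B's first loop).
def pvEmit (line : String) : List String :=
  if PySem.Str.startswith line "release-text:" then
    [PySem.Str.strip (PySem.Str.slice line (some 13) none), ""]
  else
    []

def get_release_text_alt (desc : String) : List String :=
  let lines := PySem.Str.splitlines desc
  match lines.findIdx? (fun l => PySem.Str.startswith l "release-text-lines:") with
  | none => lines.flatMap pvEmit
  | some idx => (lines.take idx).flatMap pvEmit ++ (lines.drop (idx + 1)).map PySem.Str.rstrip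

-- ===== PRECONDITION & SPEC =====
def Spec_get_release_text (desc : String) (out : List String) : Prop := out = get_release_text_alt desc
instance (desc : String) (out : List String) : Decidable (Spec_get_release_text desc out) := by unfold Spec_get_release_text; infer_instance

-- ===== CLAIM (what is proved, stated in full; the proofs are below) =====
def Claim_equal_get_release_text : Prop := ∀ (desc : String), Dom_get_release_text desc → Spec_get_release_text desc (get_release_text desc)

-- ===== LEMMAS AND PROOFS =====

-- After the flag is set, A just rstrips every remaining line.
theorem pvALoop_true (lines : List String) :
    pvALoop lines true = lines.map PySem.Str.rstrip := by
  induction lines with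
  | nil => rfl
  | cons l rest ih => simp [pvALoop, ih]

-- B's body as a function of the line list.
def pvB (lines : List String) : List String :=
  match lines.findIdx? (fun l => PySem.Str.startswith l "release-text-lines:") with
  | none => lines.flatMap pvEmit
  | some idx => (lines.take idx).flatMap pvEmit ++ (lines.drop (idx + 1)).map PySem.Str.rstrip

theorem pvALoop_false_eq_pvB (lines : List String) :
    pvALoop lines false = pvB lines := by
  induction lines with
  | nil => rfl
  | cons l rest ih =>
    by_cases hM : PySem.Str.startswith l "release-text-lines:" = true
    · simp only [pvALoop, pvB, List.findIdx?_cons, hM, if_true, pvALoop_true,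
        List.take_zero, List.flatMap_nil, List.drop_succ_cons, List.drop_zero, List.nil_append]
      simp
    · have hstep : pvALoop (l :: rest) false = pvEmit l ++ pvALoop rest false := by
        by_cases hT : PySem.Str.startswith l "release-text:" = true
        · simp only [pvALoop, pvEmit, hM, hT, if_true, List.cons_append, List.nil_append]
          simp
        · simp only [pvALoop, pvEmit, hM, hT]
          simp
      rw [hstep, ih]
      unfold pvB
      simp only [List.findIdx?_cons, hM]
      cases hfind : rest.findIdx? (fun l => PySem.Str.startswith l "release-text-lines:") with
      | none => simp [List.flatMap_cons]
      | some i => simp [List.flatMap_cons, List.take_succ_cons, List.drop_succ_cons]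

-- ===== VERDICT (by name: the statement is the Claim_ definition above) =====
theorem get_release_text_spec : Claim_equal_get_release_text := by
  intro desc _
  unfold Spec_get_release_text get_release_text get_release_text_alt
  exact pvALoop_false_eq_pvB _
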